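-- pv_equiv track=rewrite | github.com/kayo5000/Prosodic | suggestion_engine.py | _rhyme_unit_from_raw
-- ===== SOURCE A (Python) =====
-- def _rhyme_unit_from_raw(phonemes):
--     last_stress = None
--     for i, p in enumerate(phonemes):
--         if p[-1].isdigit() and int(p[-1]) >= 1:
--             last_stress = i
--     if last_stress is None:
--         for i, p in enumerate(phonemes):
--             if p[-1].isdigit():
--                 last_stress = i
--     if last_stress is None:
--         return None
--     return tuple(phonemes[last_stress:])
-- ===== SOURCE B (Python) =====
-- def _rhyme_unit_from_raw(phonemes):
--     fallback = None
--     for i in range(len(phonemes) - 1, -1, -1):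
--         c = phonemes[i][-1]
--         if c.isdigit():
--             if int(c) >= 1:
--                 return tuple(phonemes[i:])
--             if fallback is None:
--                 fallback = i
--     if fallback is None:
--         return None
--     return tuple(phonemes[fallback:])
-- ===== Notes on version B (the rewrite author's own statement) =====
-- stated objective: alternative
-- what changed: A makes two full forward scans (last-match-wins into a mutable variable, then a fallback scan); B makes a single backward scan with early return at the first stressed phoneme seen from the right, remembering the rightmost unstressed digit phoneme as fallback.
import Mathlib
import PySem

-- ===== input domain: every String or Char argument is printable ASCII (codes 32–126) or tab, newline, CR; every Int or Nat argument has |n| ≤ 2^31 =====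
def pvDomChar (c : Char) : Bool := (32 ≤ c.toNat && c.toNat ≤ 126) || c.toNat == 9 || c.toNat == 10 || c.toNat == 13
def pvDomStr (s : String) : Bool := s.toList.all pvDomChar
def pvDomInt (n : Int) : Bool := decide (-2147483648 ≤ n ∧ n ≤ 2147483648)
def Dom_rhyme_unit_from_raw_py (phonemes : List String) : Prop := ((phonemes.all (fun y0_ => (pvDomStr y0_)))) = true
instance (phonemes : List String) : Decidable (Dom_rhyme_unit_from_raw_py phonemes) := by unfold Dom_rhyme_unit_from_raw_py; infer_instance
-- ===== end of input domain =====

-- B replaces A's two full forward last-match scans by a single backward scan that returns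
-- early at the first stressed phoneme from the right, keeping the rightmost unstressed
-- digit phoneme as fallback (objective: alternative). Pre_ excludes lists containing an
-- empty phoneme, on which A raises IndexError.


-- ===== PORT A =====
-- p[-1]: the default ' ' is unreachable under Pre_ (an empty phoneme = IndexError, excluded)
def pvLastChar (s : String) : Char := PySem.List.pyGetD s.toList (-1) ' '
-- int(c) for a single character c (only reached behind an isdigit guard in both programs)
def pvDigitVal (c : Char) : Int := (PySem.Int.ofStr? (String.ofList [c])).getD 0

def rhyme_unit_from_raw_py (phonemes : List String) : Option (List String) :=
  -- first loop: last_stress := last i with p[-1] a digit and int(p[-1]) >= 1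
  let ls1 : Option Int := (PySem.List.enumerate phonemes 0).foldl
    (fun acc ip =>
      if PySem.Chars.isdigit (pvLastChar ip.2) && decide (1 ≤ pvDigitVal (pvLastChar ip.2))
      then some ip.1 else acc) none
  -- second loop, only if last_stress is still None: last i with p[-1] a digit
  let ls2 : Option Int :=
    match ls1 with
    | none => (PySem.List.enumerate phonemes 0).foldl
        (fun acc ip => if PySem.Chars.isdigit (pvLastChar ip.2) then some ip.1 else acc) none
    | some i => some i
  match ls2 with
  | none => none
  | some i => some (PySem.List.slice phonemes (some i) none)

-- ===== PORT B =====
-- the backward for-loop with its early return and the mutable `fallback`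
def rhyme_alt_go (phonemes : List String) (idxs : List Int) (fallback : Option Int) :
    Option (List String) :=
  match idxs with
  | [] =>
    match fallback with
    | none => none
    | some f => some (PySem.List.slice phonemes (some f) none)
  | i :: rest =>
    let c := pvLastChar (PySem.List.pyGetD phonemes i "")
    if PySem.Chars.isdigit c then
      if 1 ≤ pvDigitVal c then some (PySem.List.slice phonemes (some i) none)
      else rhyme_alt_go phonemes rest (if fallback = none then some i else fallback)
    else rhyme_alt_go phonemes rest fallback

def rhyme_unit_from_raw_py_alt (phonemes : List String) : Option (List String) :=
  rhyme_alt_go phonemes (PySem.List.pyRange ((phonemes.length : Int) - 1) (-1) (-1)) none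

-- ===== PRECONDITION & SPEC =====
-- Pre_ excludes exactly the inputs on which the Python A raises (IndexError at p[-1]
-- for an empty phoneme).
def Pre_rhyme_unit_from_raw_py (phonemes : List String) : Prop := ∀ p ∈ phonemes, p ≠ ""
instance (phonemes : List String) : Decidable (Pre_rhyme_unit_from_raw_py phonemes) := by unfold Pre_rhyme_unit_from_raw_py; infer_instance
def pvWitness_rhyme_unit_from_raw_py : List String := ["K", "AE1", "T"]
def Spec_rhyme_unit_from_raw_py (phonemes : List String) (out : Option (List String)) : Prop := out = rhyme_unit_from_raw_py_alt phonemes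
instance (phonemes : List String) (out : Option (List String)) : Decidable (Spec_rhyme_unit_from_raw_py phonemes out) := by unfold Spec_rhyme_unit_from_raw_py; infer_instance

-- ===== CLAIM (what is proved, stated in full; the proofs are below) =====
def Claim_equal_rhyme_unit_from_raw_py : Prop := ∀ (phonemes : List String), Dom_rhyme_unit_from_raw_py phonemes → Pre_rhyme_unit_from_raw_py phonemes → Spec_rhyme_unit_from_raw_py phonemes (rhyme_unit_from_raw_py phonemes)

-- ===== LEMMAS AND PROOFS =====

-- abbreviations for the two per-index tests (stressed digit / any digit)
def pvQs (phonemes : List String) (i : Int) : Bool :=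
  PySem.Chars.isdigit (pvLastChar (PySem.List.pyGetD phonemes i "")) &&
    decide (1 ≤ pvDigitVal (pvLastChar (PySem.List.pyGetD phonemes i "")))
def pvQd (phonemes : List String) (i : Int) : Bool :=
  PySem.Chars.isdigit (pvLastChar (PySem.List.pyGetD phonemes i ""))

theorem getLast?_cons_or {β : Type} (a : β) (m : List β) :
    (a :: m).getLast? = m.getLast?.or (some a) := by
  cases m with
  | nil => rfl
  | cons b bs =>
    rw [List.getLast?_cons_cons]
    rcases h : (b :: bs).getLast? with _ | v
    · simp [List.getLast?_eq_none_iff] at h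
    · rfl

-- A's "last match wins" loop computes the last element of the filtered, mapped list
theorem foldl_lastWins {α β : Type} (q : α → Bool) (f : α → β) :
    ∀ (l : List α) (a0 : Option β),
      l.foldl (fun acc x => if q x then some (f x) else acc) a0
        = ((l.filter q).map f).getLast?.or a0 := by
  intro l
  induction l with
  | nil => intro a0; simp
  | cons x xs ih =>
    intro a0
    by_cases hq : q x
    · simp only [List.foldl_cons, hq, if_pos, List.filter_cons_of_pos hq, List.map_cons]
      rw [ih, getLast?_cons_or, Option.or_assoc, Option.some_or]
    · simp only [List.foldl_cons, hq, if_neg, List.filter_cons_of_neg, Bool.not_eq_true]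
      rw [ih]

-- A's two per-pair filters over enumerate rewritten as index filters over range(0, n)
theorem enum_filter_eq_s (phonemes : List String) :
    (((PySem.List.enumerate phonemes 0).filter
        (fun ip => PySem.Chars.isdigit (pvLastChar ip.2) && decide (1 ≤ pvDigitVal (pvLastChar ip.2)))).map (fun ip => ip.1))
      = (PySem.List.pyRange 0 (phonemes.length : Int) 1).filter (pvQs phonemes) := by
  rw [PySem.List.enumerate_eq_map_pyRange (d := "")]
  rw [List.filter_map, List.map_map]
  simp only [Function.comp_def]
  rw [List.map_id']
  rfl

theorem enum_filter_eq_d (phonemes : List String) :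
    (((PySem.List.enumerate phonemes 0).filter
        (fun ip => PySem.Chars.isdigit (pvLastChar ip.2))).map (fun ip => ip.1))
      = (PySem.List.pyRange 0 (phonemes.length : Int) 1).filter (pvQd phonemes) := by
  rw [PySem.List.enumerate_eq_map_pyRange (d := "")]
  rw [List.filter_map, List.map_map]
  simp only [Function.comp_def]
  rw [List.map_id']
  rfl

-- characterisation of B's backward loop: it returns the tail at the first stressed index
-- in idxs, else at the fallback (or, failing that, the first digit index in idxs)
theorem rhyme_alt_go_spec (phonemes : List String) :
    ∀ (idxs : List Int) (fb : Option Int),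
      rhyme_alt_go phonemes idxs fb
        = match (idxs.filter (pvQs phonemes)).head? with
          | some i => some (PySem.List.slice phonemes (some i) none)
          | none =>
            match fb.or ((idxs.filter (pvQd phonemes)).head?) with
            | none => none
            | some f => some (PySem.List.slice phonemes (some f) none) := by
  intro idxs
  induction idxs with
  | nil => intro fb; cases fb <;> rfl
  | cons i rest ih =>
    intro fb
    simp only [rhyme_alt_go]
    by_cases hd : PySem.Chars.isdigit (pvLastChar (PySem.List.pyGetD phonemes i "")) = true
    · by_cases hs : 1 ≤ pvDigitVal (pvLastChar (PySem.List.pyGetD phonemes i ""))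
      · have hqs : pvQs phonemes i = true := by simp [pvQs, hd, hs]
        rw [if_pos hd, if_pos hs, List.filter_cons_of_pos hqs, List.head?_cons]
      · have hqs : ¬ pvQs phonemes i = true := by simp [pvQs, hs]
        have hqd : pvQd phonemes i = true := by simp [pvQd, hd]
        rw [if_pos hd, if_neg hs, ih, List.filter_cons_of_neg hqs,
            List.filter_cons_of_pos hqd, List.head?_cons]
        cases h : (rest.filter (pvQs phonemes)).head? with
        | some j => rfl
        | none =>
          have hor : (if fb = none then some i else fb).or ((rest.filter (pvQd phonemes)).head?)
              = fb.or (some i) := by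
            cases fb <;> simp
          rw [hor]
    · have hqs : ¬ pvQs phonemes i = true := by simp [pvQs, hd]
      have hqd : ¬ pvQd phonemes i = true := by simp [pvQd, hd]
      rw [if_neg hd, ih, List.filter_cons_of_neg hqs, List.filter_cons_of_neg hqd]

-- B's index list is the reverse of range(0, n)
theorem idxs_eq_reverse (phonemes : List String) :
    PySem.List.pyRange ((phonemes.length : Int) - 1) (-1) (-1)
      = (PySem.List.pyRange 0 (phonemes.length : Int) 1).reverse := by
  rw [PySem.List.pyRange_neg_one_eq_reverse]
  norm_num

theorem rhyme_unit_equal (phonemes : List String) :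
    rhyme_unit_from_raw_py phonemes = rhyme_unit_from_raw_py_alt phonemes := by
  simp only [rhyme_unit_from_raw_py, rhyme_unit_from_raw_py_alt]
  rw [idxs_eq_reverse, rhyme_alt_go_spec]
  rw [foldl_lastWins (fun ip => PySem.Chars.isdigit (pvLastChar ip.2) && decide (1 ≤ pvDigitVal (pvLastChar ip.2))) (fun ip => ip.1) (PySem.List.enumerate phonemes 0) none,
      foldl_lastWins (fun ip => PySem.Chars.isdigit (pvLastChar ip.2)) (fun ip => ip.1) (PySem.List.enumerate phonemes 0) none,
      Option.or_none, Option.or_none]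
  rw [enum_filter_eq_s phonemes, enum_filter_eq_d phonemes]
  rw [List.filter_reverse, List.filter_reverse, List.head?_reverse, List.head?_reverse,
      Option.none_or]
  cases hS : ((PySem.List.pyRange 0 (phonemes.length : Int) 1).filter (pvQs phonemes)).getLast? with
  | some i => rfl
  | none =>
    cases hD : ((PySem.List.pyRange 0 (phonemes.length : Int) 1).filter (pvQd phonemes)).getLast? with
    | some f => rfl
    | none => rfl

-- ===== VERDICT (by name: the statement is the Claim_ definition above) =====
theorem rhyme_unit_from_raw_py_spec : Claim_equal_rhyme_unit_from_raw_py := by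
  intro phonemes _ _
  unfold Spec_rhyme_unit_from_raw_py
  exact rhyme_unit_equal phonemes
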